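-- pv_equiv track=rewrite | github.com/pypi-data/pypi-mirror-403 | packages/session-buddy/session_buddy-0.13.0.tar.gz/session_buddy-0.13.0/session_buddy/core/intelligence.py | _detect_search_before_implement
-- ===== SOURCE A (Python) =====
-- import typing as t
--
-- def _detect_search_before_implement(
--     conversation_history: list[dict[str, t.Any]]
-- ) -> bool:
--     """Detect pattern: search reflections → reuse solution."""
--     has_search = False
--     has_implementation = False
--
--     for entry in conversation_history:
--         content = entry.get("content", "").lower()
--         if "search" in content and ("reflection" in content or "past" in content):
--             has_search = True
--         if has_search and ("implement" in content or "apply" in content):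
--             has_implementation = True
--
--     return has_search and has_implementation
-- ===== SOURCE B (Python) =====
-- def _detect_search_before_implement(conversation_history):
--     """Detect pattern: search reflections -> reuse solution."""
--     contents = [entry.get("content", "").lower() for entry in conversation_history]
--     for i, c in enumerate(contents):
--         if "search" in c and ("reflection" in c or "past" in c):
--             return any("implement" in d or "apply" in d for d in contents[i:])
--     return False
-- ===== Notes on version B (the rewrite author's own statement) =====
-- stated objective: simpler
-- what changed: Replaces A's single stateful two-flag accumulator pass with a find-first-search-entry then scan-the-remaining-suffix decomposition over a precomputed list of lowercased contents, with an early return.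
import Mathlib
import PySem

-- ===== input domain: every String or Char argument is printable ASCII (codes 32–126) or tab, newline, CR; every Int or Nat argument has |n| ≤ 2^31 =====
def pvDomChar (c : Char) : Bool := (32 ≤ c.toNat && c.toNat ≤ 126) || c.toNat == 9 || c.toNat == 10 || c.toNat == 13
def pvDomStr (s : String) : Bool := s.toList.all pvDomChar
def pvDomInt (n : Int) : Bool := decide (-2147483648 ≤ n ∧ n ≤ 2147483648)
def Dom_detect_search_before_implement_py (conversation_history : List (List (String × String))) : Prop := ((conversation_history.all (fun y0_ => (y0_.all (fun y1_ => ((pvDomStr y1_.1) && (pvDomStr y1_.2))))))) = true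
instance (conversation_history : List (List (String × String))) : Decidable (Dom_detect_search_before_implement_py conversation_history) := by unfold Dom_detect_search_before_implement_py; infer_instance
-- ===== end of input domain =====

-- B replaces A's stateful two-flag single pass by find-the-first-search-entry then scan the
-- remaining suffix for an implement/apply entry (objective: simpler). Same cost, early return.

-- ===== PORT A =====
-- A: one fold over the history carrying the two flags (has_search, has_implementation).
def detect_search_before_implement_py (conversation_history : List (List (String × String))) : Bool :=
  let r := conversation_history.foldl
    (fun (st : Bool × Bool) entry =>
      let content := PySem.Str.lower (PySem.Dict.getD (PySem.Dict.mk entry) "content" "")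
      let has_search := st.1 ||
        (PySem.Str.isIn "search" content &&
          (PySem.Str.isIn "reflection" content || PySem.Str.isIn "past" content))
      let has_implementation := st.2 ||
        (has_search && (PySem.Str.isIn "implement" content || PySem.Str.isIn "apply" content))
      (has_search, has_implementation))
    (false, false)
  r.1 && r.2

-- ===== PORT B =====
-- Source B: entry.get("content","").lower() for each entry
def pvContent (entry : List (String × String)) : String :=
  PySem.Str.lower (PySem.Dict.getD (PySem.Dict.mk entry) "content" "")

def pvIsSearch (c : String) : Bool :=
  PySem.Str.isIn "search" c && (PySem.Str.isIn "reflection" c || PySem.Str.isIn "past" c)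

def pvIsImpl (c : String) : Bool :=
  PySem.Str.isIn "implement" c || PySem.Str.isIn "apply" c

-- Source B's enumerate loop with early return: at the first search entry, contents[i:] is exactly
-- the current cons cell (c :: rest), scanned with any.
def pvScan : List String → Bool
  | [] => false
  | c :: rest => if pvIsSearch c then (c :: rest).any pvIsImpl else pvScan rest

def detect_search_before_implement_py_alt (conversation_history : List (List (String × String))) : Bool :=
  pvScan (conversation_history.map pvContent)

-- ===== PRECONDITION & SPEC =====
def Spec_detect_search_before_implement_py (conversation_history : List (List (String × String))) (out : Bool) : Prop := out = detect_search_before_implement_py_alt conversation_history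
instance (conversation_history : List (List (String × String))) (out : Bool) : Decidable (Spec_detect_search_before_implement_py conversation_history out) := by unfold Spec_detect_search_before_implement_py; infer_instance

-- ===== CLAIM (what is proved, stated in full; the proofs are below) =====
def Claim_equal_detect_search_before_implement_py : Prop := ∀ (conversation_history : List (List (String × String))), Dom_detect_search_before_implement_py conversation_history → Spec_detect_search_before_implement_py conversation_history (detect_search_before_implement_py conversation_history)

-- ===== LEMMAS AND PROOFS =====

-- A's fold step, on an already-extracted lowercased content.
def pvStepA (st : Bool × Bool) (c : String) : Bool × Bool :=
  (st.1 || pvIsSearch c, st.2 || ((st.1 || pvIsSearch c) && pvIsImpl c))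

theorem foldl_pvStepA_true (cs : List String) (hi : Bool) :
    cs.foldl pvStepA (true, hi) = (true, hi || cs.any pvIsImpl) := by
  induction cs generalizing hi with
  | nil => simp
  | cons c cs ih => simp [pvStepA, ih, Bool.or_assoc]

theorem foldl_pvStepA_eq_pvScan (cs : List String) :
    ((cs.foldl pvStepA (false, false)).1 && (cs.foldl pvStepA (false, false)).2) = pvScan cs := by
  induction cs with
  | nil => rfl
  | cons c cs ih =>
    by_cases h : pvIsSearch c = true
    · simp [pvScan, pvStepA, h, foldl_pvStepA_true]
    · simp at h
      simp [pvScan, pvStepA, h, ih]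

-- ===== VERDICT (by name: the statement is the Claim_ definition above) =====
theorem detect_search_before_implement_py_spec : Claim_equal_detect_search_before_implement_py := by
  intro ch _
  unfold Spec_detect_search_before_implement_py detect_search_before_implement_py
    detect_search_before_implement_py_alt
  rw [← foldl_pvStepA_eq_pvScan, List.foldl_map]
  rfl
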